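-- pv_equiv track=rewrite | github.com/Kruschenstein/modeverif | gen.py | gen_qi_set
-- ===== SOURCE A (Python) =====
-- INDENTATION = " " * 3
--
-- def gen_qi_set(nb_process, j):
--     """
--     generate Q[i] := j; statement
--     """
--     system = ""
--     for i in range(1, nb_process+1):
--         system += INDENTATION + "<"
--         system += "_, " * (i -1)
--         system += "goSetTURN%i, " % j
--         system += "_, " * (nb_process - i)
--         system += "_, " * (i -1)
--         system += "set%i, " % j
--         system += "_, " * (nb_process -i)
--         for _ in range(1, nb_process):
--             system += "_, "
--         system = system[:-2]
--         system += "> -> p%i_set_Q%i_%i;\n" % (i, i, j)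
--     return system
-- ===== SOURCE B (Python) =====
-- INDENTATION = " " * 3
--
-- def gen_qi_set(nb_process, j):
--     """
--     generate Q[i] := j; statement
--     """
--     def line(i):
--         fields = ["_"] * (3 * nb_process - 1)
--         fields[i - 1] = "goSetTURN%i" % j
--         fields[nb_process + i - 1] = "set%i" % j
--         return INDENTATION + "<" + ", ".join(fields) + "> -> p%i_set_Q%i_%i;\n" % (i, i, j)
--     return "".join(line(i) for i in range(1, nb_process + 1))
-- ===== Notes on version B (the rewrite author's own statement) =====
-- stated objective: faster
-- what changed: B builds each line as a flat list of 3*nb_process-1 placeholder fields, overwrites the two special fields at arithmetically computed indices, and joins with ', ' (lines joined once at the end), instead of A's emitting seven underscore segments with trailing separators and re-slicing the entire accumulated string with system[:-2] on every line.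
import Mathlib
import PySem

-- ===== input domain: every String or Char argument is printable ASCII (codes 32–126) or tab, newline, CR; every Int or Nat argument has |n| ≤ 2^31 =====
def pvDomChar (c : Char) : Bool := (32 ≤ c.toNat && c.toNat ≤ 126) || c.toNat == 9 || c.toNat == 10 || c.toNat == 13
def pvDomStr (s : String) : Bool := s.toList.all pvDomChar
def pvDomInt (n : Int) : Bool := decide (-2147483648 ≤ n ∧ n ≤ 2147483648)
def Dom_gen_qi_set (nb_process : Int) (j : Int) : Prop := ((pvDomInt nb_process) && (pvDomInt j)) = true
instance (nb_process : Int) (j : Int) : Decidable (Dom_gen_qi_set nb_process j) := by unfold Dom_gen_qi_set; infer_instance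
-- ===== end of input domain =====

-- B computes, for each line, the flat list of 3*nb_process-1 fields (two set arithmetically by
-- index) and joins with ", ", instead of A's emit-underscore-segments-then-strip-", " rebuilding
-- of the whole accumulated string per line — objective: faster (measured).  Both are total.

-- ===== PORT A =====
-- The Python str accumulator is represented exactly as its list of code points (PySem.Chars);
-- the final String.mk is the only conversion.
def gen_qi_set (nb_process : Int) (j : Int) : String :=
  String.mk <|
    (PySem.List.pyRange 1 (nb_process + 1) 1).foldl (fun system i =>
      let system := system ++ "   <".toList
      let system := system ++ PySem.List.pyRepeat "_, ".toList (i - 1)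
      let system := system ++ ("goSetTURN".toList ++ PySem.Int.toChars j ++ ", ".toList)
      let system := system ++ PySem.List.pyRepeat "_, ".toList (nb_process - i)
      let system := system ++ PySem.List.pyRepeat "_, ".toList (i - 1)
      let system := system ++ ("set".toList ++ PySem.Int.toChars j ++ ", ".toList)
      let system := system ++ PySem.List.pyRepeat "_, ".toList (nb_process - i)
      let system := (PySem.List.pyRange 1 nb_process 1).foldl (fun s _ => s ++ "_, ".toList) system
      let system := PySem.List.slice system none (some (-2))
      system ++ ("> -> p".toList ++ PySem.Int.toChars i ++ "_set_Q".toList ++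
                 PySem.Int.toChars i ++ "_".toList ++ PySem.Int.toChars j ++ ";\n".toList)) []

-- ===== PORT B =====
def gen_qi_set_alt (nb_process : Int) (j : Int) : String :=
  String.mk <|
    (((PySem.List.pyRange 1 (nb_process + 1) 1).map (fun i =>
      let fields := List.replicate (3 * nb_process - 1).toNat "_".toList
      let fields := fields.set (i - 1).toNat ("goSetTURN".toList ++ PySem.Int.toChars j)
      let fields := fields.set (nb_process + i - 1).toNat ("set".toList ++ PySem.Int.toChars j)
      "   <".toList ++ PySem.Chars.join ", ".toList fields ++
        ("> -> p".toList ++ PySem.Int.toChars i ++ "_set_Q".toList ++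
         PySem.Int.toChars i ++ "_".toList ++ PySem.Int.toChars j ++ ";\n".toList))).flatten)

-- ===== PRECONDITION & SPEC =====
def Spec_gen_qi_set (nb_process : Int) (j : Int) (out : String) : Prop := out = gen_qi_set_alt nb_process j
instance (nb_process : Int) (j : Int) (out : String) : Decidable (Spec_gen_qi_set nb_process j out) := by unfold Spec_gen_qi_set; infer_instance

-- ===== CLAIM (what is proved, stated in full; the proofs are below) =====
def Claim_equal_gen_qi_set : Prop := ∀ (nb_process : Int) (j : Int), Dom_gen_qi_set nb_process j → Spec_gen_qi_set nb_process j (gen_qi_set nb_process j)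

-- ===== LEMMAS AND PROOFS =====

-- abbreviations used only by the proofs
def pvU : List Char := "_, ".toList
def pvSep : List Char := ", ".toList
def pvRep (t : Nat) : List Char := (List.replicate t pvU).flatten

theorem pvRep_add (a b : Nat) : pvRep (a + b) = pvRep a ++ pvRep b := by
  unfold pvRep
  rw [List.replicate_add, List.flatten_append]

-- the inner 'for _ in range(1, nb_process)' loop appends pvRep of the range length
theorem pvInnerLoop (l : List Int) (s : List Char) :
    l.foldl (fun s _ => s ++ pvU) s = s ++ pvRep l.length := by
  induction l generalizing s with
  | nil => simp [pvRep]
  | cons x t ih =>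
      simp only [List.foldl_cons, ih]
      simp [pvRep, List.replicate_succ, List.append_assoc]

-- join with ", " versus concatenating "field + ', '" blocks
theorem pvJoinFlat (fs : List (List Char)) (x : List Char) :
    (List.map (fun f => f ++ pvSep) (x :: fs)).flatten =
      PySem.Chars.join pvSep (x :: fs) ++ pvSep := by
  induction fs generalizing x with
  | nil => simp [PySem.Chars.join_singleton]
  | cons y t ih =>
      rw [PySem.Chars.join_cons_cons]
      simp only [List.map_cons, List.flatten_cons] at *
      rw [ih y]; simp

-- setting index a inside replicate (a+1+b)
theorem pvSetReplicate {α : Type} (a b : Nat) (x v : α) :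
    (List.replicate (a + 1 + b) x).set a v =
      List.replicate a x ++ v :: List.replicate b x := by
  induction a with
  | zero => simp [List.replicate_succ, Nat.add_comm]
  | succ n ih =>
      have h1 : n + 1 + 1 + b = (n + 1 + b) + 1 := by omega
      rw [h1, List.replicate_succ]
      simp only [List.set_cons_succ, ih]
      simp [List.replicate_succ]

-- B's fields list, made explicit for 1 ≤ i ≤ n (i = 1 + k, n = m)
theorem pvFields (m k : Nat) (G S : List Char) (hk : k < m) :
    ((List.replicate (3 * m - 1) ("_".toList)).set k G).set (m + k) S =
      List.replicate k "_".toList ++ G ::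
        (List.replicate (m - 1) "_".toList ++ S ::
          List.replicate (2 * m - 2 - k) "_".toList) := by
  have h1 : 3 * m - 1 = k + 1 + (3 * m - 2 - k) := by omega
  rw [h1, pvSetReplicate]
  rw [List.set_append]
  have hlen : (List.replicate k ("_".toList)).length = k := by simp
  rw [hlen]
  have : ¬ (m + k < k) := by omega
  simp only [this, if_false]
  have h2 : m + k - k = m := by omega
  rw [h2]
  have h3 : (G :: List.replicate (3 * m - 2 - k) ("_".toList)).set m S =
      G :: (List.replicate (3 * m - 2 - k) ("_".toList)).set (m - 1) S := by
    have hm : m = (m - 1) + 1 := by omega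
    rw [hm]; simp [List.set_cons_succ]
  rw [h3]
  have h4 : 3 * m - 2 - k = (m - 1) + 1 + (2 * m - 2 - k) := by omega
  rw [h4, pvSetReplicate]

-- one line: A's body-with-trailing-separator equals the flattened field blocks
theorem pvBody (m k : Nat) (G S : List Char) (hk : k < m) :
    pvRep k ++ (G ++ pvSep) ++ pvRep (m - 1 - k) ++ pvRep k ++ (S ++ pvSep) ++
        pvRep (m - 1 - k) ++ pvRep (m - 1) =
      (List.map (fun f => f ++ pvSep)
        (List.replicate k "_".toList ++ G ::
          (List.replicate (m - 1) "_".toList ++ S ::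
            List.replicate (2 * m - 2 - k) "_".toList))).flatten := by
  have hu : ("_".toList : List Char) ++ pvSep = pvU := by decide
  have hrep : ∀ t : Nat, (List.map (fun f => f ++ pvSep) (List.replicate t ("_".toList))).flatten = pvRep t := by
    intro t; rw [List.map_replicate, hu]; rfl
  simp only [List.map_append, List.map_cons, List.flatten_append, List.flatten_cons, hrep]
  have e1 : pvRep (m - 1 - k) ++ pvRep k = pvRep (m - 1) := by
    rw [← pvRep_add]; congr 1; omega
  have e2 : pvRep (m - 1 - k) ++ pvRep (m - 1) = pvRep (2 * m - 2 - k) := by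
    rw [← pvRep_add]; congr 1; omega
  calc pvRep k ++ (G ++ pvSep) ++ pvRep (m - 1 - k) ++ pvRep k ++ (S ++ pvSep) ++
        pvRep (m - 1 - k) ++ pvRep (m - 1)
      = pvRep k ++ ((G ++ pvSep) ++ ((pvRep (m - 1 - k) ++ pvRep k) ++
          ((S ++ pvSep) ++ (pvRep (m - 1 - k) ++ pvRep (m - 1))))) := by simp [List.append_assoc]
    _ = _ := by rw [e1, e2]


-- taking all but the trailing ", "
theorem pvStrip (acc pre : List Char) (h : 2 ≤ pre.length) :
    PySem.List.slice (acc ++ pre) none (some (-2)) = acc ++ pre.take (pre.length - 2) := by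
  rw [PySem.List.slice_to_neg_ofNat _ 2 (by omega)]
  rw [List.take_append]
  have hl : (acc ++ pre).length = acc.length + pre.length := by simp
  rw [hl]
  have h1 : acc.length + pre.length - 2 - acc.length = pre.length - 2 := by omega
  have h2 : List.take (acc.length + pre.length - 2) acc = acc := by
    apply List.take_of_length_le; omega
  rw [h1, h2]

-- a foldl whose step appends a per-element block is the flatten of the per-element blocks
theorem pvFoldFlat {β : Type} (l : List β) (f : List Char → β → List Char)
    (g : β → List Char) (h : ∀ i ∈ l, ∀ acc, f acc i = acc ++ g i) :
    ∀ acc, l.foldl f acc = acc ++ (l.map g).flatten := by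
  induction l with
  | nil => simp
  | cons x t ih =>
      intro acc
      simp only [List.foldl_cons, List.map_cons, List.flatten_cons]
      rw [h x (by simp) acc, ih (fun i hi => h i (by simp [hi]))]
      simp

theorem gen_qi_set_spec_aux (nb_process j : Int) :
    gen_qi_set nb_process j = gen_qi_set_alt nb_process j := by
  unfold gen_qi_set gen_qi_set_alt
  congr 1
  apply pvFoldFlat
  intro i hi acc
  rw [PySem.List.mem_pyRange_one] at hi
  obtain ⟨hi1, hi2⟩ := hi
  -- name the pieces
  set G : List Char := "goSetTURN".toList ++ PySem.Int.toChars j with hG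
  set S : List Char := "set".toList ++ PySem.Int.toChars j with hS
  set tail : List Char := "> -> p".toList ++ PySem.Int.toChars i ++ "_set_Q".toList ++
      PySem.Int.toChars i ++ "_".toList ++ PySem.Int.toChars j ++ ";\n".toList with htail
  -- nat parameters: i = 1 + k, nb_process = m, k < m
  obtain ⟨k, hk⟩ : ∃ k : Nat, i - 1 = (k : Int) := ⟨(i - 1).toNat, by omega⟩
  obtain ⟨m, hm⟩ : ∃ m : Nat, nb_process = (m : Int) := ⟨nb_process.toNat, by omega⟩
  have hkm : k < m := by omega
  -- rewrite the pyRepeat's into pvRep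
  have hr1 : PySem.List.pyRepeat ("_, ".toList) (i - 1) = pvRep k := by
    simp [PySem.List.pyRepeat, pvRep, pvU, hk]
  have hr2 : PySem.List.pyRepeat ("_, ".toList) (nb_process - i) = pvRep (m - 1 - k) := by
    have : nb_process - i = ((m - 1 - k : Nat) : Int) := by omega
    simp [PySem.List.pyRepeat, pvRep, pvU, this]
  have hinner : ∀ s : List Char,
      (PySem.List.pyRange 1 nb_process 1).foldl (fun s _ => s ++ "_, ".toList) s =
        s ++ pvRep (m - 1) := by
    intro s
    have := pvInnerLoop (PySem.List.pyRange 1 nb_process 1) s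
    rw [show ("_, ".toList : List Char) = pvU from rfl] at *
    rw [this, PySem.List.length_pyRange_one]
    congr 2; omega
  simp only [hr1, hr2]
  rw [hinner]
  -- the accumulated prefix before the [:-2]
  have hpre :
      acc ++ "   <".toList ++ pvRep k ++ (G ++ ", ".toList) ++ pvRep (m - 1 - k) ++ pvRep k ++
          (S ++ ", ".toList) ++ pvRep (m - 1 - k) ++ pvRep (m - 1) =
        acc ++ ("   <".toList ++ (pvRep k ++ (G ++ pvSep) ++ pvRep (m - 1 - k) ++ pvRep k ++
          (S ++ pvSep) ++ pvRep (m - 1 - k) ++ pvRep (m - 1))) := by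
    simp [pvSep, List.append_assoc]
  rw [hpre, pvBody m k G S hkm]
  -- fields as in B
  have hfields := pvFields m k G S hkm
  set fields : List (List Char) :=
      List.replicate k "_".toList ++ G ::
        (List.replicate (m - 1) "_".toList ++ S ::
          List.replicate (2 * m - 2 - k) "_".toList) with hf
  -- body = join ++ sep
  have hne : ∃ x fs, fields = x :: fs := by
    cases hx : List.replicate k ("_".toList : List Char) with
    | nil => exact ⟨_, _, by rw [hf, hx]; rfl⟩
    | cons a t => exact ⟨_, _, by rw [hf, hx]; rfl⟩
  obtain ⟨x, fs, hxfs⟩ := hne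
  have hjoin : (List.map (fun f => f ++ pvSep) fields).flatten =
      PySem.Chars.join pvSep fields ++ pvSep := by
    rw [hxfs]; exact pvJoinFlat fs x
  rw [hjoin]
  -- strip the trailing ", "
  have hstrip := pvStrip acc
      ("   <".toList ++ (PySem.Chars.join pvSep fields ++ pvSep))
      (by simp [pvSep])
  rw [show acc ++ ("   <".toList ++ (PySem.Chars.join pvSep fields ++ pvSep)) =
        acc ++ "   <".toList ++ (PySem.Chars.join pvSep fields ++ pvSep) by simp [List.append_assoc]] at hstrip ⊢
  rw [hstrip]
  -- the take removes exactly pvSep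
  have htake : ("   <".toList ++ (PySem.Chars.join pvSep fields ++ pvSep)).take
      (("   <".toList ++ (PySem.Chars.join pvSep fields ++ pvSep)).length - 2) =
        "   <".toList ++ PySem.Chars.join pvSep fields := by
    have hl : ("   <".toList ++ (PySem.Chars.join pvSep fields ++ pvSep)).length - 2 =
        ("   <".toList ++ PySem.Chars.join pvSep fields).length := by
      simp [pvSep]
    rw [hl, show ("   <".toList ++ (PySem.Chars.join pvSep fields ++ pvSep)) =
          ("   <".toList ++ PySem.Chars.join pvSep fields) ++ pvSep by simp]
    exact List.take_left
  rw [htake]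
  -- both sides are now acc ++ line; match B's let-bound fields
  have hBfields :
      ((List.replicate (3 * nb_process - 1).toNat ("_".toList)).set (i - 1).toNat G).set
          (nb_process + i - 1).toNat S = fields := by
    have e1 : (3 * nb_process - 1).toNat = 3 * m - 1 := by omega
    have e2 : (i - 1).toNat = k := by omega
    have e3 : (nb_process + i - 1).toNat = m + k := by omega
    rw [e1, e2, e3, hfields]
  simp only [hBfields, pvSep, List.append_assoc]

-- ===== VERDICT (by name: the statement is the Claim_ definition above) =====
theorem gen_qi_set_spec : Claim_equal_gen_qi_set := by
  intro nb_process j _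
  unfold Spec_gen_qi_set
  exact gen_qi_set_spec_aux nb_process j
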